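-- pv_equiv track=rewrite | github.com/Osteospermum/Project-Euler | Individual problems/Project Euler 36.py | sum_binary_palindrome
-- ===== SOURCE A (Python) =====
-- def sum_binary_palindrome(upper_bound):
--     def is_palindrome(n):
--         if len(str(n)) < 2:
--             return True
--         a = str(n)[0:len(str(n)) // 2]
--         b = str(n)[-(len(str(n)) // 2):]
--         b = b[::-1]
--         if a == b:
--             return True
--         return False
--
--     result = 0
--     for i in range(upper_bound):
--         if is_palindrome(i):
--             if is_palindrome(bin(i)[2:]):
--                 result += i
--     return result
-- ===== SOURCE B (Python) =====
-- def _rev(n, base):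
--     r = 0
--     while n > 0:
--         r = r * base + n % base
--         n //= base
--     return r
--
--
-- def sum_binary_palindrome(upper_bound):
--     # A number > 0 whose binary form is a palindrome must be odd
--     # (it starts with bit 1, so it must end with bit 1); 0 adds nothing.
--     total = 0
--     for i in range(1, upper_bound, 2):
--         if _rev(i, 10) == i and _rev(i, 2) == i:
--             total += i
--     return total
-- ===== Notes on version B (the rewrite author's own statement) =====
-- stated objective: faster
-- what changed: B tests palindromicity by an arithmetic digit-reversal loop (r = r*base + n%base) instead of building str()/bin() strings and comparing sliced halves, and it skips all even numbers, iterating range(1, upper_bound, 2), since a positive binary palindrome must be odd.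
import Mathlib
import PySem

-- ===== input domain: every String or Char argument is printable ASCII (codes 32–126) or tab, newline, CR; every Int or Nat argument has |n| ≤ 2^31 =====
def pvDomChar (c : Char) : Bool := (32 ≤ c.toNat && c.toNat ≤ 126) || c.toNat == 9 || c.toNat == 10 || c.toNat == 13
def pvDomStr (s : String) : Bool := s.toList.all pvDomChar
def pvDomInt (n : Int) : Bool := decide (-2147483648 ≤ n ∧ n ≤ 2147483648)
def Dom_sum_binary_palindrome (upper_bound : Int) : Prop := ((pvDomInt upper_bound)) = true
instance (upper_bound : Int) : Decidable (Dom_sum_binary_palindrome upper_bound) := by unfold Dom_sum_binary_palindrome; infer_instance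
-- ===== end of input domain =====

-- B replaces A's string-slicing palindrome tests by arithmetic digit-reversal loops and
-- iterates only over odd numbers (a positive binary palindrome is odd); measured faster.


-- ===== PORT A =====
-- A's inner `is_palindrome` is called on an int and on a string; inside, `str(n)` is the
-- identity on the string call-site, so the port takes the String and the int call-site
-- passes `PySem.Int.toStr i`.
-- a = str(n)[0 : len(str(n)) // 2];  b = str(n)[-(len(str(n)) // 2):];  b = b[::-1]
-- (slice with step -1 is never a ValueError, so .getD never takes its default); return a == b
def pyIsPalindromeStr (s : String) : Bool :=
  if PySem.Str.len s < 2 then true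
  else if PySem.Str.slice s (some 0) (some (PySem.Int.floordiv (PySem.Str.len s) 2))
      = (PySem.Str.slice?
            (PySem.Str.slice s (some (-(PySem.Int.floordiv (PySem.Str.len s) 2))) none)
            none none (-1)).getD
          (PySem.Str.slice s (some (-(PySem.Int.floordiv (PySem.Str.len s) 2))) none)
    then true else false

def sum_binary_palindrome (upper_bound : Int) : Int :=
  (PySem.List.pyRange 0 upper_bound 1).foldl
    (fun result i =>
      if pyIsPalindromeStr (PySem.Int.toStr i) then
        if pyIsPalindromeStr (PySem.Str.slice (PySem.Int.pyBin i) (some 2) none) then result + i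
        else result
      else result) 0

-- ===== PORT B =====
-- `_rev(n, base)`: r = 0; while n > 0: r = r*base + n%base; n //= base.  The `2 ≤ base`
-- conjunct is only a totality guard (B calls _rev with bases 10 and 2 only).
def pvRevLoop (n base r : Int) : Int :=
  if _h : 0 < n ∧ 2 ≤ base then
    pvRevLoop (PySem.Int.floordiv n base) base (r * base + PySem.Int.mod n base)
  else r
termination_by n.toNat
decreasing_by
  have hd : PySem.Int.floordiv n base = ((n.toNat / base.toNat : Nat) : Int) := by
    have h1 : n = (n.toNat : Int) := by omega
    have h2 : base = (base.toNat : Int) := by omega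
    rw [h1, h2, PySem.Int.floordiv_natCast]
    simp
  have hlt : n.toNat / base.toNat < n.toNat := Nat.div_lt_self (by omega) (by omega)
  rw [hd]
  omega

def pvRev (n base : Int) : Int := pvRevLoop n base 0

def sum_binary_palindrome_alt (upper_bound : Int) : Int :=
  (PySem.List.pyRange 1 upper_bound 2).foldl
    (fun total i => if pvRev i 10 = i ∧ pvRev i 2 = i then total + i else total) 0

-- ===== PRECONDITION & SPEC =====
def Spec_sum_binary_palindrome (upper_bound : Int) (out : Int) : Prop := out = sum_binary_palindrome_alt upper_bound
instance (upper_bound : Int) (out : Int) : Decidable (Spec_sum_binary_palindrome upper_bound out) := by unfold Spec_sum_binary_palindrome; infer_instance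

-- ===== CLAIM (what is proved, stated in full; the proofs are below) =====
def Claim_equal_sum_binary_palindrome : Prop := ∀ (upper_bound : Int), Dom_sum_binary_palindrome upper_bound → Spec_sum_binary_palindrome upper_bound (sum_binary_palindrome upper_bound)

-- ===== LEMMAS AND PROOFS =====

-- `Nat.toDigits` (what PySem.Int.toStr/pyBin print) as Mathlib digits, for positive input.
theorem pvToDigitsCore_eq (b : Nat) (hb : 2 ≤ b) (fuel : Nat) :
    ∀ (m : Nat) (ds : List Char), 0 < m → m < fuel →
      Nat.toDigitsCore b fuel m ds = ((Nat.digits b m).map Nat.digitChar).reverse ++ ds := by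
  induction fuel with
  | zero => intro m ds hm hf; omega
  | succ f ih =>
    intro m ds hm hf
    rw [Nat.toDigitsCore.eq_def]
    have hd : Nat.digits b m = m % b :: Nat.digits b (m / b) := Nat.digits_def' (by omega) hm
    by_cases h0 : m / b = 0
    · simp [h0, hd]
    · have hlt : m / b < m := Nat.div_lt_self hm (by omega)
      simp only [h0]
      rw [ih (m / b) ((m % b).digitChar :: ds) (Nat.pos_of_ne_zero h0) (by omega), hd]
      simp

theorem pvToDigits_eq (b m : Nat) (hb : 2 ≤ b) (hm : 0 < m) :
    Nat.toDigits b m = ((Nat.digits b m).map Nat.digitChar).reverse := by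
  rw [Nat.toDigits, pvToDigitsCore_eq b hb (m + 1) m [] hm (by omega), List.append_nil]

theorem pvToDigits_zero (b : Nat) : Nat.toDigits b 0 = ['0'] := by
  simp [Nat.toDigits, Nat.toDigitsCore]
  decide

-- digitChar is injective below 10
theorem pvDigitChar_inj : ∀ a < 10, ∀ b < 10, Nat.digitChar a = Nat.digitChar b → a = b := by decide

theorem pvMap_digitChar_inj (L1 L2 : List Nat) (h1 : ∀ d ∈ L1, d < 10) (h2 : ∀ d ∈ L2, d < 10)
    (h : L1.map Nat.digitChar = L2.map Nat.digitChar) : L1 = L2 := by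
  induction L1 generalizing L2 with
  | nil => cases L2 <;> simp_all
  | cons a T ih =>
    cases L2 with
    | nil => simp_all
    | cons a' T' =>
      simp only [List.map_cons, List.cons.injEq] at h
      have ha : a = a' := pvDigitChar_inj a (h1 a (by simp)) a' (h2 a' (by simp)) h.1
      have hT : T = T' := ih T' (fun d hd => h1 d (List.mem_cons_of_mem a hd))
        (fun d hd => h2 d (List.mem_cons_of_mem a' hd)) h.2
      rw [ha, hT]

-- value of the reversed digit list is below m when the last written digit is 0
theorem pvOfDigits_rev_lt (b m : Nat) (hb : 1 < b) (hm : 0 < m) (h0 : m % b = 0) :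
    Nat.ofDigits b ((Nat.digits b m).reverse) < m := by
  have hd : Nat.digits b m = m % b :: Nat.digits b (m / b) := Nat.digits_def' hb hm
  rw [hd, h0, List.reverse_cons, Nat.ofDigits_append, Nat.ofDigits_singleton]
  have hlt : Nat.ofDigits b ((Nat.digits b (m / b)).reverse) < b ^ ((Nat.digits b (m / b)).reverse).length :=
    Nat.ofDigits_lt_base_pow_length hb (fun d hd' => Nat.digits_lt_base hb (by
      exact List.mem_reverse.mp hd'))
  have hlen : ¬ m < b ^ (Nat.digits b (m / b)).length := by
    intro hcon
    have := (Nat.digits_length_le_iff hb m).mpr hcon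
    rw [hd] at this
    simp at this
  simp only [List.length_reverse] at hlt
  omega

theorem pvDigits_pal_iff (b m : Nat) (hb : 1 < b) :
    Nat.digits b m = (Nat.digits b m).reverse ↔
      Nat.ofDigits b ((Nat.digits b m).reverse) = m := by
  constructor
  · intro h; rw [← h, Nat.ofDigits_digits]
  · intro h
    rcases Nat.eq_zero_or_pos m with hm | hm
    · simp [hm]
    · by_cases h0 : m % b = 0
      · exact absurd h (by have := pvOfDigits_rev_lt b m hb hm h0; omega)
      · have hd : Nat.digits b m = m % b :: Nat.digits b (m / b) := Nat.digits_def' hb hm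
        have hne : (Nat.digits b m).reverse ≠ [] := by simp [hd]
        have hlast : ∀ (hne' : (Nat.digits b m).reverse ≠ []),
            ((Nat.digits b m).reverse).getLast hne' ≠ 0 := by
          intro hne'
          simp only [hd, List.reverse_cons]
          rw [List.getLast_concat]
          exact h0
        have := Nat.digits_ofDigits b hb ((Nat.digits b m).reverse)
          (fun d hd' => Nat.digits_lt_base hb (List.mem_reverse.mp hd')) hlast
        rw [h] at this
        exact this

theorem pvRevLoop_eq (b : Nat) (hb : 2 ≤ b) :
    ∀ (m : Nat) (r : Int), pvRevLoop (m : Int) (b : Int) r =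
      r * (b : Int) ^ (Nat.digits b m).length + ((Nat.ofDigits b ((Nat.digits b m).reverse) : Nat) : Int) := by
  intro m
  induction m using Nat.strong_induction_on with
  | _ m ih =>
    intro r
    rw [pvRevLoop]
    rcases Nat.eq_zero_or_pos m with hm | hm
    · rw [dif_neg (by simp [hm])]
      simp [hm, Nat.ofDigits_nil]
    · rw [dif_pos ⟨by exact_mod_cast hm, by exact_mod_cast hb⟩]
      rw [PySem.Int.floordiv_natCast, PySem.Int.mod_natCast]
      rw [ih (m / b) (Nat.div_lt_self hm (by omega)) _]
      have hd : Nat.digits b m = m % b :: Nat.digits b (m / b) := Nat.digits_def' (by omega) hm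
      rw [hd, List.reverse_cons, Nat.ofDigits_append, Nat.ofDigits_singleton]
      simp only [List.length_cons, List.length_reverse]
      push_cast
      ring

theorem pvRev_self_iff (b m : Nat) (hb : 2 ≤ b) :
    pvRev (m : Int) (b : Int) = (m : Int) ↔ Nat.digits b m = (Nat.digits b m).reverse := by
  rw [pvRev, pvRevLoop_eq b hb m 0]
  rw [pvDigits_pal_iff b m (by omega)]
  constructor
  · intro h; exact_mod_cast by simpa using h
  · intro h; simp; exact_mod_cast h

-- a positive even number is not a binary palindrome
theorem pvEven_not_binpal (m : Nat) (hm : 0 < m) (he : m % 2 = 0) :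
    ¬ pvRev (m : Int) 2 = (m : Int) := by
  intro h
  have h2 : ((2 : Nat) : Int) = (2 : Int) := by norm_num
  rw [← h2, pvRev_self_iff 2 m le_rfl] at h
  have := pvOfDigits_rev_lt 2 m (by omega) hm he
  have := (pvDigits_pal_iff 2 m (by omega)).mp h
  omega

-- the string-palindrome test of A is "the char list equals its reverse"
theorem pvLen_le_one_pal {α : Type} (l : List α) (h : l.length ≤ 1) : l = l.reverse := by
  match l, h with
  | [], _ => rfl
  | [a], _ => rfl

theorem pvTake_half_iff {α : Type} (l : List α) :
    (l.take (l.length / 2) = l.reverse.take (l.length / 2)) ↔ l = l.reverse := by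
  constructor
  · intro h
    have key : ∀ j (hj : j < l.length / 2),
        l[j]'(by omega) = l[l.length - 1 - j]'(by omega) := by
      intro j hj
      have h1 : j < (l.take (l.length / 2)).length := by simp; omega
      have h2 : j < (l.reverse.take (l.length / 2)).length := by simp; omega
      have := congrArg (fun t => t[j]?) h
      simp only [List.getElem?_eq_getElem h1, List.getElem?_eq_getElem h2] at this
      have heq : (l.take (l.length / 2))[j]'h1 = (l.reverse.take (l.length / 2))[j]'h2 :=
        Option.some.inj this
      rw [List.getElem_take, List.getElem_take] at heq
      rw [heq, List.getElem_reverse]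
    apply List.ext_getElem (by simp)
    intro i h1 h2
    rw [List.getElem_reverse]
    by_cases hi : i < l.length / 2
    · exact key i hi
    · by_cases hj : l.length - 1 - i < l.length / 2
      · have := key (l.length - 1 - i) hj
        rw [this]
        congr 1
        omega
      · congr 1
        omega
  · intro h; rw [← h]

theorem pvPalA_eq (s : String) :
    pyIsPalindromeStr s = decide (s.toList = s.toList.reverse) := by
  unfold pyIsPalindromeStr
  rw [PySem.Str.len_eq]
  by_cases hlen : s.toList.length < 2
  · rw [if_pos (by exact_mod_cast hlen)]
    exact (decide_eq_true (pvLen_le_one_pal s.toList (by omega))).symm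
  · rw [if_neg (by exact_mod_cast hlen)]
    have hk : PySem.Int.floordiv (s.toList.length : Int) 2 = ((s.toList.length / 2 : Nat) : Int) := by
      exact_mod_cast PySem.Int.floordiv_natCast s.toList.length 2
    rw [hk]
    have hkpos : 0 < s.toList.length / 2 := by omega
    have ha : (PySem.Str.slice s (some 0) (some ((s.toList.length / 2 : Nat) : Int))).toList
        = s.toList.take (s.toList.length / 2) := by
      rw [PySem.Str.toList_slice, PySem.Chars.slice_eq_listSlice,
        PySem.List.slice_zero_start, PySem.List.slice_to_natCast]
    have hb0 : (PySem.Str.slice s (some (-((s.toList.length / 2 : Nat) : Int))) none).toList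
        = s.toList.drop (s.toList.length - s.toList.length / 2) := by
      rw [PySem.Str.toList_slice, PySem.Chars.slice_eq_listSlice]
      exact PySem.List.slice_from_neg_natCast s.toList (s.toList.length / 2) hkpos
    rw [PySem.Str.slice?_none_none_neg_one, Option.getD_some]
    have hcond : (PySem.Str.slice s (some 0) (some ((s.toList.length / 2 : Nat) : Int))
          = String.ofList (PySem.Str.slice s (some (-((s.toList.length / 2 : Nat) : Int))) none).toList.reverse)
        ↔ (s.toList = s.toList.reverse) := by
      rw [← String.toList_inj, String.toList_ofList, ha, hb0]
      rw [List.reverse_drop]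
      have heq : s.toList.length - (s.toList.length - s.toList.length / 2) = s.toList.length / 2 := by omega
      rw [heq]
      exact pvTake_half_iff s.toList
    by_cases hc : s.toList = s.toList.reverse
    · rw [if_pos (hcond.mpr hc)]
      exact (decide_eq_true hc).symm
    · rw [if_neg (fun hh => hc (hcond.mp hh))]
      exact (decide_eq_false hc).symm

-- the two decimal tests agree
theorem pvCondDec (m : Nat) :
    pyIsPalindromeStr (PySem.Int.toStr (m : Int)) = decide (pvRev (m : Int) 10 = (m : Int)) := by
  rw [pvPalA_eq, PySem.Int.toList_toStr]
  have htc : PySem.Int.toChars (m : Int) = Nat.toDigits 10 m := by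
    unfold PySem.Int.toChars
    rw [if_neg (by omega)]
    simp
  rw [htc]
  simp only [decide_eq_decide]
  rw [show (10 : Int) = ((10 : Nat) : Int) by norm_num, pvRev_self_iff 10 m (by omega)]
  rcases Nat.eq_zero_or_pos m with hm | hm
  · subst hm
    rw [pvToDigits_zero]
    simp
  · rw [pvToDigits_eq 10 m (by omega) hm]
    have hlt : ∀ d ∈ Nat.digits 10 m, d < 10 := fun d hd => Nat.digits_lt_base (by omega) hd
    constructor
    · intro h
      have h' : (Nat.digits 10 m).map Nat.digitChar = ((Nat.digits 10 m).map Nat.digitChar).reverse := by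
        conv_lhs => rw [← List.reverse_reverse ((Nat.digits 10 m).map Nat.digitChar)]
        rw [← h]
      rw [← List.map_reverse] at h'
      exact pvMap_digitChar_inj _ _ hlt (fun d hd => hlt d (List.mem_reverse.mp hd)) h'
    · intro h
      rw [List.reverse_reverse, ← List.map_reverse, ← h]

-- the two binary tests agree
theorem pvCondBin (m : Nat) :
    pyIsPalindromeStr (PySem.Str.slice (PySem.Int.pyBin (m : Int)) (some 2) none)
      = decide (pvRev (m : Int) 2 = (m : Int)) := by
  rw [pvPalA_eq]
  have hsl : (PySem.Str.slice (PySem.Int.pyBin (m : Int)) (some 2) none).toList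
      = Nat.toDigits 2 m := by
    rw [PySem.Str.toList_slice, PySem.Chars.slice_eq_listSlice, PySem.Int.toList_pyBin]
    have h2 : (2 : Int) = ((2 : Nat) : Int) := by norm_num
    rw [h2, PySem.List.slice_from_natCast]
    unfold PySem.Int.toBinChars0b
    rw [if_neg (by omega)]
    simp
  rw [hsl]
  simp only [decide_eq_decide]
  rw [show (2 : Int) = ((2 : Nat) : Int) by norm_num, pvRev_self_iff 2 m le_rfl]
  rcases Nat.eq_zero_or_pos m with hm | hm
  · subst hm
    rw [pvToDigits_zero]
    simp
  · rw [pvToDigits_eq 2 m le_rfl hm]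
    have hlt : ∀ d ∈ Nat.digits 2 m, d < 10 := fun d hd => by
      have := Nat.digits_lt_base (by omega) hd; omega
    constructor
    · intro h
      have h' : (Nat.digits 2 m).map Nat.digitChar = ((Nat.digits 2 m).map Nat.digitChar).reverse := by
        conv_lhs => rw [← List.reverse_reverse ((Nat.digits 2 m).map Nat.digitChar)]
        rw [← h]
      rw [← List.map_reverse] at h'
      exact pvMap_digitChar_inj _ _ hlt (fun d hd => hlt d (List.mem_reverse.mp hd)) h'
    · intro h
      rw [List.reverse_reverse, ← List.map_reverse, ← h]

-- the contribution of one i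
def pvG (i : Int) : Int := if pvRev i 10 = i ∧ pvRev i 2 = i then i else 0

theorem pvG_even (m : Nat) (he : m % 2 = 0) : pvG (m : Int) = 0 := by
  rcases Nat.eq_zero_or_pos m with hm | hm
  · subst hm; unfold pvG; split <;> rfl
  · unfold pvG
    rw [if_neg (fun hh => pvEven_not_binpal m hm he hh.2)]

theorem pvA_as_sum (ub : Int) :
    sum_binary_palindrome ub = ((PySem.List.pyRange 0 ub 1).map pvG).sum := by
  unfold sum_binary_palindrome
  rw [PySem.List.foldl_congr_mem _ _ (fun r i => r + pvG i) 0 ?_]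
  · rw [PySem.List.foldl_add]; simp
  · intro r i hi
    have h0 : 0 ≤ i := (PySem.List.mem_pyRange_one.mp hi).1
    obtain ⟨m, rfl⟩ := Int.eq_ofNat_of_zero_le h0
    rw [pvCondDec m, pvCondBin m]
    unfold pvG
    by_cases h1 : pvRev (m : Int) 10 = (m : Int) <;>
      by_cases h2 : pvRev (m : Int) 2 = (m : Int) <;>
      simp [h1, h2]

theorem pvB_as_sum (ub : Int) :
    sum_binary_palindrome_alt ub = ((PySem.List.pyRange 1 ub 2).map pvG).sum := by
  unfold sum_binary_palindrome_alt
  rw [PySem.List.foldl_congr_mem _ _ (fun r i => r + pvG i) 0 ?_]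
  · rw [PySem.List.foldl_add]; simp
  · intro r i _
    unfold pvG
    by_cases h : pvRev i 10 = i ∧ pvRev i 2 = i <;> simp [h]

-- the odd range of B, one step at a time
theorem pvRange2_eq (n : Nat) :
    PySem.List.pyRange 1 (n : Int) 2 = (List.range (n / 2)).map (fun k : Nat => 1 + 2 * (k : Int)) := by
  rw [PySem.List.pyRange_of_pos 1 (n : Int) (by norm_num)]
  by_cases h : (1 : Int) < (n : Int)
  · rw [if_pos h]
    have ht : (((n : Int) - 1 + 2 - 1) / 2).toNat = n / 2 := by omega
    rw [ht]
  · rw [if_neg h]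
    have h0 : n / 2 = 0 := by omega
    rw [h0]

theorem pvRange_split (n : Nat) :
    ((PySem.List.pyRange 0 (n : Int) 1).map pvG).sum
      = ((PySem.List.pyRange 1 (n : Int) 2).map pvG).sum := by
  induction n with
  | zero =>
    rw [pvRange2_eq 0, Nat.cast_zero, PySem.List.pyRange_of_pos 0 0 (by norm_num)]
    simp
  | succ n ih =>
    have hcast : ((n + 1 : Nat) : Int) = (n : Int) + 1 := by push_cast; ring
    rw [hcast, PySem.List.pyRange_one_succ_right (by exact_mod_cast Nat.zero_le n)]
    rw [← hcast, pvRange2_eq (n + 1)]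
    rw [pvRange2_eq n] at ih
    by_cases hpar : n % 2 = 1
    · have h1 : (n + 1) / 2 = n / 2 + 1 := by omega
      rw [h1, List.range_succ]
      simp only [List.map_append, List.sum_append, List.map_cons, List.map_nil,
        List.sum_cons, List.sum_nil]
      rw [ih]
      have h2 : (1 : Int) + 2 * ((n / 2 : Nat) : Int) = (n : Int) := by omega
      rw [h2]
    · have h1 : (n + 1) / 2 = n / 2 := by omega
      rw [h1]
      simp only [List.map_append, List.sum_append, List.map_cons, List.map_nil,
        List.sum_cons, List.sum_nil]
      rw [ih, pvG_even n (by omega)]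
      ring

-- ===== VERDICT (by name: the statement is the Claim_ definition above) =====
theorem sum_binary_palindrome_spec : Claim_equal_sum_binary_palindrome := by
  intro ub _
  unfold Spec_sum_binary_palindrome
  rw [pvA_as_sum, pvB_as_sum]
  by_cases h : ub ≤ 0
  · rw [PySem.List.pyRange_of_pos 0 ub (by norm_num), PySem.List.pyRange_of_pos 1 ub (by norm_num)]
    rw [if_neg (by omega), if_neg (by omega)]
    simp
  · obtain ⟨n, rfl⟩ := Int.eq_ofNat_of_zero_le (by omega : (0:Int) ≤ ub)
    exact pvRange_split n
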